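-- pv_equiv track=rewrite | github.com/chrisD91/anesthPlot | anesplot/treatrec/manage_events.py | convert_day
-- ===== SOURCE A (Python) =====
-- def convert_day(txt: str) -> str:
--     """Convert YYYYmonthD to YYY-month-D."""
--     previous = txt[0]
--     new = txt[0]
--     for car in txt[1:]:
--         if car.isalpha() == previous.isalpha():
--             new += car
--         else:
--             new += "-" + car
--         previous = car
--     return new
-- ===== SOURCE B (Python) =====
-- def convert_day(txt: str) -> str:
--     """Convert YYYYmonthD to YYY-month-D."""
--     cls = txt[0].isalpha()
--     i = 1
--     while i < len(txt) and txt[i].isalpha() == cls: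
--         i += 1
--     if i == len(txt):
--         return txt
--     return txt[:i] + "-" + convert_day(txt[i:])
-- ===== Notes on version B (the rewrite author's own statement) =====
-- stated objective: alternative
-- what changed: B is recursive run-peeling: it scans off the leading maximal same-class (alpha vs non-alpha) run, recurses on the remaining suffix and joins the pieces with a dash, instead of A's single iterative pass that compares each character with the previous one and grows the output string in place.
import Mathlib
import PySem

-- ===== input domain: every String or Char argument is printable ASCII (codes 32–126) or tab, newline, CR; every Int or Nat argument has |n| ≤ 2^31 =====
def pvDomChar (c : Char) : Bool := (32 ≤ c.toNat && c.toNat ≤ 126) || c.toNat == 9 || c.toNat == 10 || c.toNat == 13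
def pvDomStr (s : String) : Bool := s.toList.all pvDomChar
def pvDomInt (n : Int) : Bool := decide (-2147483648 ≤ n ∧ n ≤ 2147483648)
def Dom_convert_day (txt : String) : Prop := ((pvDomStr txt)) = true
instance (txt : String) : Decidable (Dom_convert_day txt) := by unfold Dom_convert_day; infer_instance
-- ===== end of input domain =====

-- B recursively peels the leading maximal same-class (alpha/non-alpha) run and joins the
-- pieces with a dash, instead of A's iterative per-character boundary pass; an alternative
-- decomposition, not faster.

-- ===== PORT A =====
-- A: previous = txt[0]; new = txt[0]; for car in txt[1:]: append car or "-"+car; previous = car.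
def convert_day (txt : String) : String :=
  match txt.toList with
  | [] => ""  -- txt[0] raises IndexError here; excluded by Pre_convert_day
  | c0 :: rest =>
    let st := rest.foldl
      (fun (s : Char × List Char) car =>
        (car, if PySem.Chars.isalpha car == PySem.Chars.isalpha s.1
              then s.2 ++ [car] else s.2 ++ ['-', car]))
      (c0, [c0])
    String.ofList st.2

-- ===== PORT B =====
-- B on the char list: the while loop scanning i while txt[i] has txt[0]'s class is
-- takeWhile/dropWhile on the tail; then either the whole string, or run ++ "-" ++ recurse.
def convert_day_altGo : List Char → List Char
  | [] => []  -- txt[0] raises IndexError here; excluded by Pre_convert_day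
  | c :: rest =>
    let run := rest.takeWhile (fun d => PySem.Chars.isalpha d == PySem.Chars.isalpha c)
    let rem := rest.dropWhile (fun d => PySem.Chars.isalpha d == PySem.Chars.isalpha c)
    if rem.isEmpty then c :: run
    else c :: run ++ '-' :: convert_day_altGo rem
termination_by l => l.length
decreasing_by
  simp only [List.length_cons]
  exact Nat.lt_succ_of_le (List.length_dropWhile_le _ _)

def convert_day_alt (txt : String) : String :=
  String.ofList (convert_day_altGo txt.toList)

-- ===== PRECONDITION & SPEC =====
-- Pre_ excludes only the empty string, on which A raises IndexError (txt[0]).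
def Pre_convert_day (txt : String) : Prop := txt ≠ ""
instance (txt : String) : Decidable (Pre_convert_day txt) := by unfold Pre_convert_day; infer_instance
def pvWitness_convert_day : String := "2024may5"

def Spec_convert_day (txt : String) (out : String) : Prop := out = convert_day_alt txt
instance (txt : String) (out : String) : Decidable (Spec_convert_day txt out) := by unfold Spec_convert_day; infer_instance

-- ===== CLAIM (what is proved, stated in full; the proofs are below) =====
def Claim_equal_convert_day : Prop := ∀ (txt : String), Dom_convert_day txt → Pre_convert_day txt → Spec_convert_day txt (convert_day txt)

-- ===== LEMMAS AND PROOFS =====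

-- A's loop tail, written as structural recursion (proof-only helper).
def convert_day_aTail (prev : Char) : List Char → List Char
  | [] => []
  | c :: cs =>
    (if PySem.Chars.isalpha c == PySem.Chars.isalpha prev then [c] else ['-', c])
      ++ convert_day_aTail c cs

theorem convert_day_foldA (rest : List Char) :
    ∀ (prev : Char) (acc : List Char),
      (rest.foldl
        (fun (s : Char × List Char) car =>
          (car, if PySem.Chars.isalpha car == PySem.Chars.isalpha s.1
                then s.2 ++ [car] else s.2 ++ ['-', car]))
        (prev, acc)).2 = acc ++ convert_day_aTail prev rest := by
  induction rest with
  | nil => intro prev acc; simp [convert_day_aTail]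
  | cons c cs ih =>
    intro prev acc
    simp only [List.foldl_cons, convert_day_aTail]
    rw [ih]
    split <;> simp

-- Peeling step inside a run: a same-class head merges into the next run.
theorem convert_day_altGo_cons_same (c d : Char) (ds : List Char)
    (h : PySem.Chars.isalpha d = PySem.Chars.isalpha c) :
    convert_day_altGo (c :: d :: ds) = c :: convert_day_altGo (d :: ds) := by
  rw [convert_day_altGo.eq_def, convert_day_altGo.eq_def]
  have hp : (fun x => PySem.Chars.isalpha x == PySem.Chars.isalpha c)
      = (fun x => PySem.Chars.isalpha x == PySem.Chars.isalpha d) := by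
    funext x; rw [h]
  simp only [List.takeWhile, List.dropWhile, h, beq_self_eq_true, hp]
  split <;> simp

theorem convert_day_altGo_eq_aTail (l : List Char) :
    ∀ (c : Char), convert_day_altGo (c :: l) = c :: convert_day_aTail c l := by
  induction l with
  | nil => intro c; rw [convert_day_altGo.eq_def]; simp [convert_day_aTail]
  | cons d ds ih =>
    intro c
    by_cases h : PySem.Chars.isalpha d = PySem.Chars.isalpha c
    · rw [convert_day_altGo_cons_same c d ds h, ih d]
      simp [convert_day_aTail, h]
    · rw [convert_day_altGo.eq_def]
      have hp : (PySem.Chars.isalpha d == PySem.Chars.isalpha c) = false := by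
        simp [h]
      simp only [List.takeWhile, List.dropWhile, hp]
      simp only [List.isEmpty_cons, if_neg (by decide : ¬False), Bool.false_eq_true]
      rw [ih d]
      simp [convert_day_aTail, hp]

-- ===== VERDICT (by name: the statement is the Claim_ definition above) =====
theorem convert_day_spec : Claim_equal_convert_day := by
  intro txt _ hpre
  unfold Spec_convert_day convert_day convert_day_alt
  cases hl : txt.toList with
  | nil =>
    exact absurd (by cases txt with | _ l => simp at hl; simp [hl]) hpre
  | cons c rest =>
    simp only [convert_day_foldA, convert_day_altGo_eq_aTail]
    simp
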